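-- pv_equiv track=rewrite | github.com/maurogarzia/Programacion1 | FuncionesTP6.py | repeticiones_mas_de_una_vez
-- ===== SOURCE A (Python) =====
-- def repeticiones_mas_de_una_vez(array): #Muestra los elementos que se repiten mas de una
--     new_list = []
--     for i in array:
--         counter = array.count(i) #Cuento cuantas veces se repiten los elementos
--         if counter > 1:
--             new_tupla = (i,f"Se repite: {counter}")
--             new_list.append(new_tupla) #Agrego la tupla con el vlaor de la posicion y las veces que se repite a una lista
--     new_list = set(new_list)
--     return new_list
-- ===== SOURCE B (Python) =====
-- def repeticiones_mas_de_una_vez(array):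
--     # Build a frequency table in one pass, then emit one tuple per distinct
--     # repeated element from the table (no rescans of the array).
--     counts = {}
--     for x in array:
--         counts[x] = counts.get(x, 0) + 1
--     return {(k, f"Se repite: {c}") for k, c in counts.items() if c > 1}
-- ===== Notes on version B (the rewrite author's own statement) =====
-- stated objective: faster
-- what changed: Replaces the O(n^2) per-element array.count rescans with a single-pass frequency dict followed by one pass over the distinct keys of the table.
import Mathlib
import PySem

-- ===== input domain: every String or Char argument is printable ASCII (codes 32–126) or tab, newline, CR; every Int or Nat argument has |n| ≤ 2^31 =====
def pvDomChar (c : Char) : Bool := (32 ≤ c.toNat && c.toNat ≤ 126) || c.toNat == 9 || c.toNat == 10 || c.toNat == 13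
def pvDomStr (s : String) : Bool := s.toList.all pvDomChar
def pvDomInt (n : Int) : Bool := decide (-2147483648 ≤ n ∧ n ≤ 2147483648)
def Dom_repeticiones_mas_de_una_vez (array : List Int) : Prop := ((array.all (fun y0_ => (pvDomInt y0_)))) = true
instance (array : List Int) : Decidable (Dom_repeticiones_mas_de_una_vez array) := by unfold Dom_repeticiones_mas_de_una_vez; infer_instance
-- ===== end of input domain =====

-- B replaces A's per-element array.count rescans with a one-pass frequency dict
-- followed by a single pass over the table's distinct keys (faster in a timing run).


-- ===== PORT A =====
-- for i in array: counter = array.count(i); if counter > 1: append (i, f"Se repite: {counter}"); finally set(new_list)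
def repeticiones_mas_de_una_vez (array : List Int) : List (Int × String) :=
  PySem.Set.ofList (array.foldl (fun new_list i =>
    let counter : Int := (PySem.List.count array i : Int)
    if counter > 1 then new_list ++ [(i, "Se repite: " ++ PySem.Int.toStr counter)]
    else new_list) [])

-- ===== PORT B =====
-- counts = {}; for x in array: counts[x] = counts.get(x, 0) + 1; then the set
-- comprehension over counts.items() with c > 1
def repeticiones_mas_de_una_vez_alt (array : List Int) : List (Int × String) :=
  let counts : PySem.Dict Int Int :=
    array.foldl (fun d x => d.insert x (d.getD x 0 + 1)) PySem.Dict.empty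
  PySem.Set.ofList ((counts.items.filter (fun kv => kv.2 > 1)).map
    (fun kv => (kv.1, "Se repite: " ++ PySem.Int.toStr kv.2)))

-- ===== PRECONDITION & SPEC =====
def Spec_repeticiones_mas_de_una_vez (array : List Int) (out : List (Int × String)) : Prop := out = repeticiones_mas_de_una_vez_alt array
instance (array : List Int) (out : List (Int × String)) : Decidable (Spec_repeticiones_mas_de_una_vez array out) := by unfold Spec_repeticiones_mas_de_una_vez; infer_instance

-- ===== CLAIM (what is proved, stated in full; the proofs are below) =====
def Claim_equal_repeticiones_mas_de_una_vez : Prop := ∀ (array : List Int), Dom_repeticiones_mas_de_una_vez array → Spec_repeticiones_mas_de_una_vez array (repeticiones_mas_de_una_vez array)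

-- ===== LEMMAS AND PROOFS =====

-- the 'if counter > 1: append' loop, with a Prop-valued test
theorem pv_foldl_append_ite {A B : Type} (p : A → Prop) [DecidablePred p] (f : A → B)
    (l : List A) (acc : List B) :
    l.foldl (fun acc x => if p x then acc ++ [f x] else acc) acc
      = acc ++ (l.filter (fun x => decide (p x))).map f := by
  induction l generalizing acc with
  | nil => simp
  | cons x xs ih =>
    rw [List.foldl_cons, List.filter_cons]
    by_cases hp : p x
    · rw [if_pos hp, ih]
      simp [hp]
    · rw [if_neg hp, ih]
      simp [hp]

-- set(...) commutes with filtering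
theorem pv_ofList_filter {α : Type} [BEq α] [LawfulBEq α] (p : α → Bool) (l : List α) :
    PySem.Set.ofList (l.filter p) = (PySem.Set.ofList l).filter p := by
  induction l with
  | nil => rfl
  | cons x xs ih =>
    rw [PySem.Set.ofList_cons]
    by_cases hp : p x = true
    · rw [List.filter_cons_of_pos hp, PySem.Set.ofList_cons, ih,
        List.filter_cons_of_pos hp]
      unfold PySem.Set.discard
      rw [List.filter_comm]
    · rw [List.filter_cons_of_neg hp, ih, List.filter_cons_of_neg hp]
      unfold PySem.Set.discard
      rw [List.filter_filter]
      apply List.filter_congr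
      intro y _
      by_cases hyx : y = x
      · subst hyx; simp [hp]
      · simp [hyx]

-- set(...) commutes with mapping an injective function
theorem pv_ofList_map {α β : Type} [BEq α] [LawfulBEq α] [BEq β] [LawfulBEq β]
    (f : α → β) (hf : Function.Injective f) (l : List α) :
    PySem.Set.ofList (l.map f) = (PySem.Set.ofList l).map f := by
  induction l with
  | nil => rfl
  | cons x xs ih =>
    rw [List.map_cons, PySem.Set.ofList_cons, PySem.Set.ofList_cons, ih,
      List.map_cons]
    unfold PySem.Set.discard
    rw [List.filter_map]
    congr 1
    refine congrArg (List.map f) (List.filter_congr ?_)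
    intro y _
    simp only [Function.comp_apply]
    simp [hf.eq_iff]

-- ===== VERDICT (by name: the statement is the Claim_ definition above) =====
theorem repeticiones_mas_de_una_vez_spec : Claim_equal_repeticiones_mas_de_una_vez := by
  intro array _
  unfold Spec_repeticiones_mas_de_una_vez repeticiones_mas_de_una_vez repeticiones_mas_de_una_vez_alt
  rw [PySem.Dict.foldl_insert_getD_add_one_eq_counter]
  dsimp only
  rw [pv_foldl_append_ite
    (p := fun i => ((PySem.List.count array i : Int) > 1))
    (f := fun i => (i, "Se repite: " ++ PySem.Int.toStr ((PySem.List.count array i : Int))))]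
  rw [PySem.Dict.items_counter, List.filter_map, List.map_map, List.nil_append]
  have hinj : Function.Injective
      (fun i : Int => (i, "Se repite: " ++ PySem.Int.toStr ((PySem.List.count array i : Int)))) := by
    intro a b h
    exact congrArg Prod.fst h
  have hinj2 : Function.Injective
      ((fun kv : Int × Int => (kv.1, "Se repite: " ++ PySem.Int.toStr kv.2)) ∘
        fun k : Int => (k, (List.count k array : Int))) := by
    intro a b h
    exact congrArg Prod.fst h
  rw [pv_ofList_map _ hinj]
  rw [pv_ofList_filter]
  rw [pv_ofList_map _ hinj2]
  rw [pv_ofList_filter]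
  rw [PySem.Set.ofList_ofList]
  have hfil : List.filter (fun x => decide ((PySem.List.count array x : Int) > 1))
        (PySem.Set.ofList array)
      = List.filter ((fun kv : Int × Int => decide (kv.2 > 1)) ∘
          fun k : Int => (k, (List.count k array : Int))) (PySem.Set.ofList array) := by
    apply List.filter_congr
    intro y _
    simp [PySem.List.count]
  rw [hfil]
  apply List.map_congr_left
  intro y _
  simp [PySem.List.count]
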